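-- pv_equiv track=rewrite | github.com/takenosuke-code/TennisAnalyst | railway-service/convert_pose_to_keyframes.py | unwrap_angle_series
-- ===== SOURCE A (Python) =====
-- def unwrap_angle_series(angles):
--     """Add +/-360 multiples so consecutive samples differ by < 180."""
--     if not angles:
--         return []
--     out = [angles[0]]
--     for a in angles[1:]:
--         prev = out[-1]
--         delta = a - prev
--         while delta > 180:
--             delta -= 360
--         while delta <= -180:
--             delta += 360
--         out.append(prev + delta)
--     return out
-- ===== SOURCE B (Python) =====
-- def unwrap_angle_series(angles):
--     """Add +/-360 multiples so consecutive samples differ by < 180."""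
--     if not angles:
--         return []
--     prev = angles[0]
--     out = [prev]
--     for a in angles[1:]:
--         prev += (a - prev + 179) % 360 - 179
--         out.append(prev)
--     return out
-- ===== Notes on version B (the rewrite author's own statement) =====
-- stated objective: alternative
-- what changed: Replaces the per-sample while loops that add/subtract 360 repeatedly with a single floor-modulo formula ((delta+179) % 360 - 179) folding each delta into (-180,180] in O(1), and carries the previous unwrapped value in a scalar instead of reading out[-1].
import Mathlib
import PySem

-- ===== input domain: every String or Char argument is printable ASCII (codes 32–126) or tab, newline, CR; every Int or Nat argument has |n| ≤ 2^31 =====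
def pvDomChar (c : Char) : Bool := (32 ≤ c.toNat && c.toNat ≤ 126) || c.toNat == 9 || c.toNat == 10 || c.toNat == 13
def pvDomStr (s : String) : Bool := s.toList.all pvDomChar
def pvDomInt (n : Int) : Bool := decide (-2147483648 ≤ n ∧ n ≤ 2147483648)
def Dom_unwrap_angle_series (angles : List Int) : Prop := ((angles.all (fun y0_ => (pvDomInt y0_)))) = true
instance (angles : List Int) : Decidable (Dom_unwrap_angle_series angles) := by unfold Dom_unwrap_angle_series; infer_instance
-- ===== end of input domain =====

-- B replaces A's per-sample while loops (repeated ±360) by one floor-modulo formula (alternative algorithm, same cost on typical data).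

-- ===== PORT A =====
-- 'while delta > 180: delta -= 360'
def pvADown (d : Int) : Int :=
  if d > 180 then pvADown (d - 360) else d
termination_by (d - 180).toNat
decreasing_by omega

-- 'while delta <= -180: delta += 360'
def pvAUp (d : Int) : Int :=
  if d ≤ -180 then pvAUp (d + 360) else d
termination_by (-179 - d).toNat
decreasing_by simp_wf; omega

def pvStepA (out : List Int) (a : Int) : List Int :=
  let prev := PySem.List.pyGetD out (-1) 0   -- out[-1]; out is always nonempty here
  let delta := a - prev
  let delta := pvADown delta
  let delta := pvAUp delta
  out ++ [prev + delta]

def unwrap_angle_series (angles : List Int) : List Int :=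
  match angles with
  | [] => []
  | a0 :: rest => rest.foldl pvStepA [a0]

-- ===== PORT B =====
def pvStepB (st : Int × List Int) (a : Int) : Int × List Int :=
  let prev := st.1 + (PySem.Int.mod (a - st.1 + 179) 360 - 179)
  (prev, st.2 ++ [prev])

def unwrap_angle_series_alt (angles : List Int) : List Int :=
  match angles with
  | [] => []
  | a0 :: rest => (rest.foldl pvStepB (a0, [a0])).2

-- ===== PRECONDITION & SPEC =====
def Spec_unwrap_angle_series (angles : List Int) (out : List Int) : Prop := out = unwrap_angle_series_alt angles
instance (angles : List Int) (out : List Int) : Decidable (Spec_unwrap_angle_series angles out) := by unfold Spec_unwrap_angle_series; infer_instance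

-- ===== CLAIM (what is proved, stated in full; the proofs are below) =====
def Claim_equal_unwrap_angle_series : Prop := ∀ (angles : List Int), Dom_unwrap_angle_series angles → Spec_unwrap_angle_series angles (unwrap_angle_series angles)

-- ===== LEMMAS AND PROOFS =====

theorem pvADown_props (d : Int) :
    pvADown d ≤ 180 ∧ (pvADown d + 179) % 360 = (d + 179) % 360 ∧
      (-180 < d → -180 < pvADown d) := by
  induction d using pvADown.induct with
  | case1 d h ih =>
    rw [pvADown, if_pos h]
    refine ⟨ih.1, ?_, fun _ => ih.2.2 (by omega)⟩
    rw [ih.2.1]; omega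
  | case2 d h =>
    rw [pvADown, if_neg h]
    exact ⟨by omega, rfl, id⟩

theorem pvAUp_props (d : Int) (hle : d ≤ 180) :
    -179 ≤ pvAUp d ∧ pvAUp d ≤ 180 ∧ (pvAUp d + 179) % 360 = (d + 179) % 360 := by
  induction d using pvAUp.induct with
  | case1 d h ih =>
    rw [pvAUp, if_pos h]
    obtain ⟨h1, h2, h3⟩ := ih (by omega)
    exact ⟨h1, h2, by rw [h3]; omega⟩
  | case2 d h =>
    rw [pvAUp, if_neg h]
    exact ⟨by omega, hle, rfl⟩

-- the two while loops compute the unique representative of delta mod 360 in [-179, 180]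
theorem pv_norm (d : Int) : pvAUp (pvADown d) = PySem.Int.mod (d + 179) 360 - 179 := by
  obtain ⟨hd1, hd2, _⟩ := pvADown_props d
  obtain ⟨h1, h2, h3⟩ := pvAUp_props (pvADown d) hd1
  rw [PySem.Int.mod_eq_emod_of_pos (by norm_num)]
  rw [hd2] at h3
  have hr : (pvAUp (pvADown d) + 179) % 360 = pvAUp (pvADown d) + 179 := by omega
  omega

theorem pv_fold_eq (rest : List Int) :
    ∀ (out : List Int) (p : Int), PySem.List.pyGetD out (-1) 0 = p →
      rest.foldl pvStepA out = (rest.foldl pvStepB (p, out)).2 := by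
  induction rest with
  | nil => intro out p _; rfl
  | cons a rest ih =>
    intro out p hp
    simp only [List.foldl_cons]
    have hstep : pvStepA out a = out ++ [p + (PySem.Int.mod (a - p + 179) 360 - 179)] := by
      simp only [pvStepA, hp, pv_norm]
    have hstepB : pvStepB (p, out) a
        = (p + (PySem.Int.mod (a - p + 179) 360 - 179),
           out ++ [p + (PySem.Int.mod (a - p + 179) 360 - 179)]) := rfl
    rw [hstep, hstepB]
    exact ih _ _ (PySem.List.pyGetD_neg_one_append_singleton _ _ _)

-- ===== VERDICT (by name: the statement is the Claim_ definition above) =====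
theorem unwrap_angle_series_spec : Claim_equal_unwrap_angle_series := by
  intro angles _
  unfold Spec_unwrap_angle_series unwrap_angle_series unwrap_angle_series_alt
  match angles with
  | [] => rfl
  | a0 :: rest =>
    exact pv_fold_eq rest [a0] a0 rfl
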